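-- pv_equiv track=rewrite | github.com/EmanueleBarbieri2/GeNeuro | model/downstream/downstream_classification.py | label_from_subgroup
-- ===== SOURCE A (Python) =====
-- PD_GENES = ["LRRK2", "GBA", "SNCA", "PRKN", "PINK1", "PARK7", "VPS35"]
--
-- def label_from_subgroup(subgroup: str):
--     if not subgroup:
--         return None
--     s = subgroup.upper()
--     if "SWEDD" in s:
--         return "Non-PD"
--     if "HEALTHY CONTROL" in s or "NORMOSMIC" in s:
--         return "Control"
--     if "SPORADIC PD" in s:
--         return "PD"
--     for g in PD_GENES:
--         if g in s:
--             return "PD"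
--     if "RBD" in s or "HYPOSMIA" in s:
--         return "Prodromal"
--     return None
-- ===== SOURCE B (Python) =====
-- PD_GENES = ["LRRK2", "GBA", "SNCA", "PRKN", "PINK1", "PARK7", "VPS35"]
--
-- # Flat keyword table with numeric priorities; label per priority tier.
-- _KEYWORDS = ([("SWEDD", 0), ("HEALTHY CONTROL", 1), ("NORMOSMIC", 1), ("SPORADIC PD", 2)]
--              + [(g, 3) for g in PD_GENES]
--              + [("RBD", 4), ("HYPOSMIA", 4)])
-- _LABELS = ["Non-PD", "Control", "PD", "PD", "Prodromal"]
--
-- def label_from_subgroup(subgroup: str):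
--     if not subgroup:
--         return None
--     s = subgroup.upper()
--     best = None
--     # Scan the string position by position, keeping the minimum priority of any
--     # keyword that starts at some position; no cascade, no early return.
--     for i in range(len(s)):
--         for kw, pri in _KEYWORDS:
--             if (best is None or pri < best) and s.startswith(kw, i):
--                 best = pri
--     return None if best is None else _LABELS[best]
-- ===== Notes on version B (the rewrite author's own statement) =====
-- stated objective: alternative
-- what changed: Instead of A's cascade of substring-membership tests with early returns, B scans the string position by position, checks which keywords start at each position, keeps the minimum priority of any keyword found, and maps that priority to the label table at the end.
import Mathlib
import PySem

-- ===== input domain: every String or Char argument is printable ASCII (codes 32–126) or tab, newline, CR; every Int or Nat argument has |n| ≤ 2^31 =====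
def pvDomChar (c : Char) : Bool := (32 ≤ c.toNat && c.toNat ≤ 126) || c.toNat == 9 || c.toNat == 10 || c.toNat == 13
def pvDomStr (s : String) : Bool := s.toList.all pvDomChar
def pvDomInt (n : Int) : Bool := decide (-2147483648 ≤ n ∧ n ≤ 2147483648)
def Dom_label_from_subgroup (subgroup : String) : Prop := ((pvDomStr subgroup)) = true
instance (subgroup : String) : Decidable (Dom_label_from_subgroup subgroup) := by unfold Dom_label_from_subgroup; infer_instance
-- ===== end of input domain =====

-- B replaces A's substring-membership cascade by a position scan: it walks the string once over all start positions, keeps the minimum priority of any keyword starting there, and maps that priority to a label table (alternative decomposition; same cost class).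


-- ===== PORT A =====
def PD_GENES : List String := ["LRRK2", "GBA", "SNCA", "PRKN", "PINK1", "PARK7", "VPS35"]

-- A's 'for g in PD_GENES: if g in s: return "PD"' loop
def pvGeneLoop (s : String) : List String → Option String
  | [] => none
  | g :: rest => if PySem.Str.isIn g s then some "PD" else pvGeneLoop s rest

def label_from_subgroup (subgroup : String) : Option String :=
  if subgroup = "" then none
  else
    let s := PySem.Str.upper subgroup
    if PySem.Str.isIn "SWEDD" s then some "Non-PD"
    else if PySem.Str.isIn "HEALTHY CONTROL" s || PySem.Str.isIn "NORMOSMIC" s then some "Control"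
    else if PySem.Str.isIn "SPORADIC PD" s then some "PD"
    else match pvGeneLoop s PD_GENES with
      | some r => some r
      | none =>
        if PySem.Str.isIn "RBD" s || PySem.Str.isIn "HYPOSMIA" s then some "Prodromal"
        else none

-- ===== PORT B =====
def pvKeywords : List (String × Nat) :=
  [("SWEDD", 0), ("HEALTHY CONTROL", 1), ("NORMOSMIC", 1), ("SPORADIC PD", 2)]
  ++ PD_GENES.map (fun g => (g, 3))
  ++ [("RBD", 4), ("HYPOSMIA", 4)]

def pvLabels : List String := ["Non-PD", "Control", "PD", "PD", "Prodromal"]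

-- '(best is None or pri < best)'
def pvBetter (pri : Nat) : Option Nat → Bool
  | none => true
  | some b => pri < b

-- the inner 'for kw, pri in _KEYWORDS' loop at position i; s.startswith(kw, i) with 0 ≤ i is exactly Chars.startswith on s.drop i
def pvInner (s : List Char) (i : Nat) (best : Option Nat) : List (String × Nat) → Option Nat
  | [] => best
  | (kw, pri) :: rest =>
      pvInner s i
        (if pvBetter pri best && PySem.Chars.startswith (s.drop i) kw.toList then some pri else best)
        rest

def label_from_subgroup_alt (subgroup : String) : Option String :=
  if subgroup = "" then none
  else
    let s := (PySem.Str.upper subgroup).toList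
    let best := (List.range s.length).foldl (fun b i => pvInner s i b pvKeywords) none
    match best with
    | none => none
    | some p => PySem.List.pyGet? pvLabels (p : Int)  -- '_LABELS[best]': best ∈ {0,…,4}, so never an IndexError

-- ===== PRECONDITION & SPEC =====
def Spec_label_from_subgroup (subgroup : String) (out : Option String) : Prop := out = label_from_subgroup_alt subgroup
instance (subgroup : String) (out : Option String) : Decidable (Spec_label_from_subgroup subgroup out) := by unfold Spec_label_from_subgroup; infer_instance

-- ===== CLAIM (what is proved, stated in full; the proofs are below) =====
def Claim_equal_label_from_subgroup : Prop := ∀ (subgroup : String), Dom_label_from_subgroup subgroup → Spec_label_from_subgroup subgroup (label_from_subgroup subgroup)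

-- ===== LEMMAS AND PROOFS =====

-- min on Option Nat with none as identity
def pvOmin : Option Nat → Option Nat → Option Nat
  | none, y => y
  | some a, none => some a
  | some a, some b => some (min a b)

def pvListMin : List Nat → Option Nat
  | [] => none
  | p :: rest => pvOmin (some p) (pvListMin rest)

-- priorities of all keywords starting at some position in L
def pvMs (s : List Char) (L : List Nat) : List Nat :=
  L.flatMap (fun i => ((pvKeywords.filter (fun kp => PySem.Chars.startswith (s.drop i) kp.1.toList)).map Prod.snd))

theorem pvOmin_assoc (a b c : Option Nat) : pvOmin (pvOmin a b) c = pvOmin a (pvOmin b c) := by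
  cases a <;> cases b <;> cases c <;> simp [pvOmin, Nat.min_assoc]

theorem pvListMin_append (l₁ l₂ : List Nat) :
    pvListMin (l₁ ++ l₂) = pvOmin (pvListMin l₁) (pvListMin l₂) := by
  induction l₁ with
  | nil => simp [pvListMin, pvOmin]
  | cons a l ih => simp [pvListMin, ih, pvOmin_assoc]

theorem pvInner_eq (s : List Char) (i : Nat) :
    ∀ (kws : List (String × Nat)) (b : Option Nat),
      pvInner s i b kws =
        pvOmin b (pvListMin ((kws.filter (fun kp => PySem.Chars.startswith (s.drop i) kp.1.toList)).map Prod.snd)) := by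
  intro kws
  induction kws with
  | nil => intro b; cases b <;> simp [pvInner, pvListMin, pvOmin]
  | cons kp rest ih =>
    intro b
    obtain ⟨kw, pri⟩ := kp
    by_cases hsw : PySem.Chars.startswith (s.drop i) kw.toList = true
    · have hstep : (if pvBetter pri b && PySem.Chars.startswith (s.drop i) kw.toList then some pri else b)
          = pvOmin b (some pri) := by
        cases b with
        | none => simp [pvBetter, hsw, pvOmin]
        | some v =>
          simp only [pvBetter, hsw, Bool.and_true, pvOmin]
          rcases Nat.lt_or_ge pri v with h | h
          · simp [h, Nat.min_eq_right (Nat.le_of_lt h)]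
          · simp [Nat.not_lt.mpr h, Nat.min_eq_left h]
      simp only [pvInner]
      rw [hstep, ih]
      simp [hsw, pvListMin, ← pvOmin_assoc]
    · simp only [Bool.not_eq_true] at hsw
      simp [pvInner, hsw, ih]
  
theorem pvFoldl_eq (s : List Char) :
    ∀ (L : List Nat) (b : Option Nat),
      L.foldl (fun b i => pvInner s i b pvKeywords) b = pvOmin b (pvListMin (pvMs s L)) := by
  intro L
  induction L with
  | nil => intro b; cases b <;> simp [pvMs, pvListMin, pvOmin]
  | cons i L ih =>
    intro b
    rw [List.foldl_cons, ih, pvInner_eq, pvOmin_assoc]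
    simp only [pvMs, List.flatMap_cons, pvListMin_append]

theorem pvListMin_mem : ∀ {l : List Nat} {p : Nat}, pvListMin l = some p → p ∈ l := by
  intro l
  induction l with
  | nil => intro p h; simp [pvListMin] at h
  | cons a l ih =>
    intro p h
    cases hl : pvListMin l with
    | none => simp [pvListMin, hl, pvOmin] at h; simp [h]
    | some q =>
      simp [pvListMin, hl, pvOmin] at h
      rcases Nat.le_total a q with hle | hle
      · rw [Nat.min_eq_left hle] at h; simp [h]
      · rw [Nat.min_eq_right hle] at h
        exact List.mem_cons_of_mem _ (ih (h ▸ hl))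

theorem pvListMin_ne_none {a : Nat} {l : List Nat} : pvListMin (a :: l) ≠ none := by
  cases h : pvListMin l <;> simp [pvListMin, h, pvOmin]

theorem pvListMin_le : ∀ {l : List Nat} {p q : Nat}, pvListMin l = some p → q ∈ l → p ≤ q := by
  intro l
  induction l with
  | nil => intro p q h hq; simp at hq
  | cons a l ih =>
    intro p q h hq
    cases hl : pvListMin l with
    | none =>
      have hnil : l = [] := by
        cases l with
        | nil => rfl
        | cons b t => exact absurd hl pvListMin_ne_none
      subst hnil
      simp [pvListMin, pvOmin] at h
      simp at hq; omega
    | some r =>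
      simp [pvListMin, hl, pvOmin] at h
      rcases List.mem_cons.1 hq with rfl | hq'
      · omega
      · have := ih hl hq'; omega

theorem pvListMin_isSome : ∀ {l : List Nat} {p : Nat}, p ∈ l → (pvListMin l).isSome := by
  intro l p hp
  cases l with
  | nil => simp at hp
  | cons a t => cases h : pvListMin t <;> simp [pvListMin, h, pvOmin]

theorem pvListMin_eq_some_of {l : List Nat} {k : Nat} (h1 : k ∈ l) (h2 : ∀ q ∈ l, k ≤ q) :
    pvListMin l = some k := by
  cases h : pvListMin l with
  | none => have := pvListMin_isSome h1; simp [h] at this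
  | some p =>
    have hp := pvListMin_mem h
    have h1' := pvListMin_le h h1
    have h2' := h2 p hp
    rw [Nat.le_antisymm h1' h2']

-- a keyword starting at some in-range position is a substring, and conversely (keyword nonempty)
theorem pvIsIn_of_exists (s kw : List Char)
    (h : ∃ i, i < s.length ∧ PySem.Chars.startswith (s.drop i) kw = true) :
    PySem.Chars.isIn kw s = true := by
  obtain ⟨i, _, hsw⟩ := h
  exact (PySem.Chars.exists_prefix_drop_iff_isIn _ _).1 ⟨i, (PySem.Chars.startswith_iff _ _).1 hsw⟩

theorem pvSw_exists_of_isIn (s kw : List Char) (hin : PySem.Chars.isIn kw s = true)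
    (hne : kw ≠ []) :
    ∃ i, i < s.length ∧ PySem.Chars.startswith (s.drop i) kw = true := by
  obtain ⟨j, hj⟩ := (PySem.Chars.exists_prefix_drop_iff_isIn _ _).2 hin
  by_cases hjl : j < s.length
  · exact ⟨j, hjl, (PySem.Chars.startswith_iff _ _).2 hj⟩
  · exfalso
    have hd : s.drop j = [] := List.drop_eq_nil_of_le (by omega)
    rw [hd] at hj
    exact hne (List.prefix_nil.1 hj)

theorem pvMs_range_of (s : List Char) (kw : String) (pri : Nat)
    (hkp : (kw, pri) ∈ pvKeywords) (hin : PySem.Chars.isIn kw.toList s = true)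
    (hne : kw.toList ≠ []) : pri ∈ pvMs s (List.range s.length) := by
  obtain ⟨i, hi, hsw⟩ := pvSw_exists_of_isIn s kw.toList hin hne
  simp only [pvMs, List.mem_flatMap, List.mem_map, List.mem_filter, List.mem_range]
  exact ⟨i, hi, (kw, pri), ⟨hkp, hsw⟩, rfl⟩

-- membership in the matched-priorities list, phrased through the five tiers' substring tests
theorem pvMem_ms_iff (s : List Char) (p : Nat) :
    p ∈ pvMs s (List.range s.length) ↔
      ((p = 0 ∧ PySem.Chars.isIn "SWEDD".toList s = true) ∨
       (p = 1 ∧ (PySem.Chars.isIn "HEALTHY CONTROL".toList s = true ∨ PySem.Chars.isIn "NORMOSMIC".toList s = true)) ∨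
       (p = 2 ∧ PySem.Chars.isIn "SPORADIC PD".toList s = true) ∨
       (p = 3 ∧ (PySem.Chars.isIn "LRRK2".toList s = true ∨ PySem.Chars.isIn "GBA".toList s = true ∨
                 PySem.Chars.isIn "SNCA".toList s = true ∨ PySem.Chars.isIn "PRKN".toList s = true ∨
                 PySem.Chars.isIn "PINK1".toList s = true ∨ PySem.Chars.isIn "PARK7".toList s = true ∨
                 PySem.Chars.isIn "VPS35".toList s = true)) ∨
       (p = 4 ∧ (PySem.Chars.isIn "RBD".toList s = true ∨ PySem.Chars.isIn "HYPOSMIA".toList s = true))) := by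
  constructor
  · intro hmem
    simp only [pvMs, List.mem_flatMap, List.mem_map, List.mem_filter, List.mem_range] at hmem
    obtain ⟨i, hi, ⟨kw, pri⟩, ⟨hkp, hsw⟩, rfl⟩ := hmem
    have hin := pvIsIn_of_exists s kw.toList ⟨i, hi, hsw⟩
    simp only [pvKeywords, PD_GENES, List.map_cons, List.map_nil, List.cons_append,
      List.nil_append] at hkp
    fin_cases hkp <;> simp_all
  · intro h
    rcases h with ⟨rfl, hin⟩ | ⟨rfl, hin | hin⟩ | ⟨rfl, hin⟩ |
      ⟨rfl, hin | hin | hin | hin | hin | hin | hin⟩ | ⟨rfl, hin | hin⟩ <;>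
      exact pvMs_range_of s _ _ (by simp [pvKeywords, PD_GENES]) hin (by decide)

-- the gene loop returns 'some "PD"' iff some gene is a substring
theorem pvGeneLoop_eq (u : String) :
    ∀ gs : List String, pvGeneLoop u gs = if gs.any (fun g => PySem.Str.isIn g u) then some "PD" else none := by
  intro gs
  induction gs with
  | nil => simp [pvGeneLoop]
  | cons g rest ih =>
    simp only [pvGeneLoop, List.any_cons, Bool.or_eq_true, ih]
    split_ifs <;> first | rfl | tauto

-- ===== VERDICT (by name: the statement is the Claim_ definition above) =====
set_option maxHeartbeats 1600000 in
theorem label_from_subgroup_spec : Claim_equal_label_from_subgroup := by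
  intro subgroup _
  unfold Spec_label_from_subgroup label_from_subgroup label_from_subgroup_alt
  by_cases hemp : subgroup = ""
  · simp [hemp]
  · simp only [if_neg hemp]
    rw [pvFoldl_eq, pvGeneLoop_eq]
    have homin : ∀ x : Option Nat, pvOmin none x = x := fun x => by cases x <;> rfl
    rw [homin]
    set s := (PySem.Str.upper subgroup).toList with hs
    have hbest : pvListMin (pvMs s (List.range s.length)) =
        (if PySem.Chars.isIn "SWEDD".toList s = true then some 0
         else if PySem.Chars.isIn "HEALTHY CONTROL".toList s = true ∨ PySem.Chars.isIn "NORMOSMIC".toList s = true then some 1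
         else if PySem.Chars.isIn "SPORADIC PD".toList s = true then some 2
         else if PySem.Chars.isIn "LRRK2".toList s = true ∨ PySem.Chars.isIn "GBA".toList s = true ∨
                 PySem.Chars.isIn "SNCA".toList s = true ∨ PySem.Chars.isIn "PRKN".toList s = true ∨
                 PySem.Chars.isIn "PINK1".toList s = true ∨ PySem.Chars.isIn "PARK7".toList s = true ∨
                 PySem.Chars.isIn "VPS35".toList s = true then some 3
         else if PySem.Chars.isIn "RBD".toList s = true ∨ PySem.Chars.isIn "HYPOSMIA".toList s = true then some 4
         else none) := by
      split_ifs with h0 h1 h2 h3 h4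
      · refine pvListMin_eq_some_of ((pvMem_ms_iff s 0).2 (Or.inl ⟨rfl, h0⟩)) ?_
        intro q hq; omega
      · refine pvListMin_eq_some_of ((pvMem_ms_iff s 1).2 (Or.inr (Or.inl ⟨rfl, h1⟩))) ?_
        intro q hq
        rcases (pvMem_ms_iff s q).1 hq with ⟨rfl, h⟩ | ⟨rfl, h⟩ | ⟨rfl, h⟩ | ⟨rfl, h⟩ | ⟨rfl, h⟩ <;>
          first | omega | exact absurd h h0
      · refine pvListMin_eq_some_of ((pvMem_ms_iff s 2).2 (Or.inr (Or.inr (Or.inl ⟨rfl, h2⟩)))) ?_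
        intro q hq
        rcases (pvMem_ms_iff s q).1 hq with ⟨rfl, h⟩ | ⟨rfl, h⟩ | ⟨rfl, h⟩ | ⟨rfl, h⟩ | ⟨rfl, h⟩ <;>
          first | omega | exact absurd h h0 | exact absurd h h1
      · refine pvListMin_eq_some_of ((pvMem_ms_iff s 3).2 (Or.inr (Or.inr (Or.inr (Or.inl ⟨rfl, h3⟩))))) ?_
        intro q hq
        rcases (pvMem_ms_iff s q).1 hq with ⟨rfl, h⟩ | ⟨rfl, h⟩ | ⟨rfl, h⟩ | ⟨rfl, h⟩ | ⟨rfl, h⟩ <;>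
          first | omega | exact absurd h h0 | exact absurd h h1 | exact absurd h h2
      · refine pvListMin_eq_some_of ((pvMem_ms_iff s 4).2 (Or.inr (Or.inr (Or.inr (Or.inr ⟨rfl, h4⟩))))) ?_
        intro q hq
        rcases (pvMem_ms_iff s q).1 hq with ⟨rfl, h⟩ | ⟨rfl, h⟩ | ⟨rfl, h⟩ | ⟨rfl, h⟩ | ⟨rfl, h⟩ <;>
          first | omega | exact absurd h h0 | exact absurd h h1 | exact absurd h h2 |
            exact absurd h h3
      · cases hM : pvListMin (pvMs s (List.range s.length)) with
        | none => rfl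
        | some p =>
          exfalso
          have hp := pvListMin_mem hM
          rcases (pvMem_ms_iff s p).1 hp with ⟨_, h⟩ | ⟨_, h⟩ | ⟨_, h⟩ | ⟨_, h⟩ | ⟨_, h⟩
          · exact h0 h
          · exact h1 h
          · exact h2 h
          · exact h3 h
          · exact h4 h
    rw [hbest]
    simp only [PySem.Str.isIn_eq, ← hs, PD_GENES, List.any_cons, List.any_nil, Bool.or_eq_true,
      Bool.or_false]
    split_ifs <;> rfl
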